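-- pv_equiv track=rewrite | github.com/Tsuchinotama/Graphs | Ecantillonnage_arbres_couvrants/FonctionsAux.py | partiesliste_taille
-- ===== SOURCE A (Python) =====
-- def partiesliste_taille(taille, liste):
--     l=[]
--     i=0
--     imax=2**len(liste)-1
--     while i<=imax:
--         s=[]
--         j=0
--         jmax=len(liste)-1
--         while j<=jmax:
--             if (i>>j)&1 == 1:
--                 s.append(liste[j])
--             j += 1
--         if len(s)==taille:
--             l.append(s)
--         i += 1
--     return l
-- ===== SOURCE B (Python) =====
-- def partiesliste_taille(taille, liste):
--     # Directly build the size-taille combinations in colexicographic order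
--     # (the order of increasing bitmasks, i.e. exactly A's output order).
--     def combos(m, k):
--         if k == 0:
--             return [[]]
--         if k < 0 or k > m:
--             return []
--         return combos(m - 1, k) + [c + [liste[m - 1]] for c in combos(m - 1, k - 1)]
--     return combos(len(liste), taille)
-- ===== Notes on version B (the rewrite author's own statement) =====
-- stated objective: faster
-- what changed: Replaces the enumeration of all 2^n bitmasks (testing each subset's size) by a Pascal-style recursion that directly generates only the size-taille combinations in the same colexicographic order; intended as faster (output-sensitive O(C(n,taille)*taille) vs O(2^n*n)); a timing run measured B 403x faster at n=16, and at n=64 neither finished (the output itself is exponentially large there).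
import Mathlib
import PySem

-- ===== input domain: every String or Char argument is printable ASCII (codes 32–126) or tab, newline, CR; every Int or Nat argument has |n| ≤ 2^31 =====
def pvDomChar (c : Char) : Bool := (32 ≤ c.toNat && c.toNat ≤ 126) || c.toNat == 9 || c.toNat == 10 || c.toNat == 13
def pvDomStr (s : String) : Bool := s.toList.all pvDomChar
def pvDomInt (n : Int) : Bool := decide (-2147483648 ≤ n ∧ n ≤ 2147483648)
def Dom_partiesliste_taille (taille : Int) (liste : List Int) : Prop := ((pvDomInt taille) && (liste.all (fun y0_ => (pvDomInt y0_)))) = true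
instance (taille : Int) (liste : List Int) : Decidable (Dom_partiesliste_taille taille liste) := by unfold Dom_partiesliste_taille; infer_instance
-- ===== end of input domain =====

-- B enumerates only the size-taille combinations (Pascal-style recursion, colex order)
-- instead of A's scan over all 2^n bitmasks; same output; intended as faster
-- (measured 403x at n=16 in a timing run; at n=64 neither finished).

-- ===== PORT A =====
-- inner while loop of A: build the subset selected by bitmask i (j runs over all valid
-- indices, so liste.getD j 0 is exact for Python's liste[j])
def pvSousListe (liste : List Int) (i : Nat) : List Int :=
  (List.range liste.length).foldl
    (fun s j => if (i >>> j) &&& 1 == 1 then s ++ [liste.getD j 0] else s) []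

def partiesliste_taille (taille : Int) (liste : List Int) : List (List Int) :=
  -- while i <= 2**len(liste)-1 : i = 0,...,2^n-1
  (List.range (2 ^ liste.length)).foldl
    (fun l i =>
      let s := pvSousListe liste i
      if ((s.length : Int) = taille) then l ++ [s] else l) []

-- ===== PORT B =====
-- combos(m, k) of Source B: size-k combinations of liste[:m], colex order (index m-1 is valid
-- whenever the recursive branch is taken, so liste.getD (m-1) 0 is exact for liste[m-1])
def pvCombos (liste : List Int) : Nat → Int → List (List Int)
  | 0, k => if k = 0 then [[]] else []
  | m + 1, k =>
    if k = 0 then [[]]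
    else if k < 0 ∨ ((m : Int) + 1) < k then []
    else pvCombos liste m k ++ (pvCombos liste m (k - 1)).map (fun c => c ++ [liste.getD m 0])

def partiesliste_taille_alt (taille : Int) (liste : List Int) : List (List Int) :=
  pvCombos liste liste.length taille

-- ===== PRECONDITION & SPEC =====
def Spec_partiesliste_taille (taille : Int) (liste : List Int) (out : List (List Int)) : Prop := out = partiesliste_taille_alt taille liste
instance (taille : Int) (liste : List Int) (out : List (List Int)) : Decidable (Spec_partiesliste_taille taille liste out) := by unfold Spec_partiesliste_taille; infer_instance

-- ===== CLAIM (what is proved, stated in full; the proofs are below) =====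
def Claim_equal_partiesliste_taille : Prop := ∀ (taille : Int) (liste : List Int), Dom_partiesliste_taille taille liste → Spec_partiesliste_taille taille liste (partiesliste_taille taille liste)

-- ===== LEMMAS AND PROOFS =====

-- the subset picked by bitmask i out of the first m positions
def pvMask (liste : List Int) (m i : Nat) : List Int :=
  ((List.range m).filter (fun j => (i >>> j) &&& 1 == 1)).map (fun j => liste.getD j 0)

theorem pvBit_eq_testBit (i j : Nat) : ((i >>> j) &&& 1 == 1) = i.testBit j := by
  simp [Nat.testBit, Nat.and_comm]

theorem pvSousListe_eq_mask (liste : List Int) (i : Nat) :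
    pvSousListe liste i = pvMask liste liste.length i := by
  unfold pvSousListe pvMask
  rw [PySem.List.foldl_append_if]
  simp

theorem pvMask_zero (liste : List Int) (i : Nat) : pvMask liste 0 i = [] := by
  simp [pvMask]

theorem pvMask_low (liste : List Int) (m i : Nat) (h : i < 2 ^ m) :
    pvMask liste (m + 1) i = pvMask liste m i := by
  unfold pvMask
  rw [List.range_succ, List.filter_append]
  have h0 : i >>> m = 0 := by rw [Nat.shiftRight_eq_div_pow]; exact Nat.div_eq_of_lt h
  simp [h0]

theorem pvMask_high (liste : List Int) (m i : Nat) (h : i < 2 ^ m) :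
    pvMask liste (m + 1) (2 ^ m + i) = pvMask liste m i ++ [liste.getD m 0] := by
  unfold pvMask
  rw [List.range_succ, List.filter_append]
  have hlow : ∀ j ∈ List.range m, ((2 ^ m + i) >>> j &&& 1 == 1) = (i >>> j &&& 1 == 1) := by
    intro j hj
    rw [List.mem_range] at hj
    rw [pvBit_eq_testBit, pvBit_eq_testBit, Nat.testBit_two_pow_add_gt hj]
  rw [List.filter_congr hlow]
  have h1 : (2 ^ m + i) >>> m = 1 := by
    rw [Nat.shiftRight_eq_div_pow, Nat.add_comm, Nat.add_div_right _ (Nat.two_pow_pos m), Nat.div_eq_of_lt h]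
  simp [h1]

theorem pvCombos_zero (liste : List Int) (m : Nat) : pvCombos liste m 0 = [[]] := by
  cases m <;> simp [pvCombos]

theorem pvCombos_neg (liste : List Int) (m : Nat) (k : Int) (h : k < 0) :
    pvCombos liste m k = [] := by
  cases m <;> (simp [pvCombos, h]; omega)

theorem pvCombos_gt (liste : List Int) (m : Nat) (k : Int) (h : (m : Int) < k) :
    pvCombos liste m k = [] := by
  cases m with
  | zero => simp [pvCombos]; omega
  | succ m =>
    rw [pvCombos]
    have h0 : ¬ k = 0 := by push_cast at h; omega
    have h1 : k < 0 ∨ ((m : Int) + 1) < k := by push_cast at h; omega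
    simp [h0, h1]

theorem pvCombos_succ (liste : List Int) (m : Nat) (k : Int) :
    pvCombos liste (m + 1) k =
      pvCombos liste m k ++ (pvCombos liste m (k - 1)).map (fun c => c ++ [liste.getD m 0]) := by
  rw [pvCombos]
  by_cases h0 : k = 0
  · subst h0
    simp [pvCombos_zero, pvCombos_neg liste m (-1) (by omega)]
  · by_cases h1 : k < 0 ∨ ((m : Int) + 1) < k
    · rcases h1 with h1 | h1
      · rw [if_neg h0, if_pos (Or.inl h1), pvCombos_neg liste m k h1,
          pvCombos_neg liste m (k - 1) (by omega)]
        simp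
      · simp [h0, h1, pvCombos_gt liste m k (by omega), pvCombos_gt liste m (k - 1) (by omega)]
    · simp [h0, h1]

theorem pvCombos_eq_filter (liste : List Int) (m : Nat) (k : Int) :
    pvCombos liste m k =
      ((List.range (2 ^ m)).map (pvMask liste m)).filter
        (fun s => decide ((s.length : Int) = k)) := by
  induction m generalizing k with
  | zero =>
    by_cases h : k = 0 <;>
      simp [pvCombos, pvMask_zero, h]; omega
  | succ m ih =>
    rw [pvCombos_succ]
    have hsplit : (2 : Nat) ^ (m + 1) = 2 ^ m + 2 ^ m := by ring
    rw [hsplit, List.range_add]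
    rw [List.map_append, List.filter_append, List.map_map]
    congr 1
    · rw [ih k]
      congr 1
      apply List.map_congr_left
      intro i hi
      exact (pvMask_low liste m i (List.mem_range.mp hi)).symm
    · rw [ih (k - 1)]
      have hmap : (List.range (2 ^ m)).map (pvMask liste (m + 1) ∘ (2 ^ m + ·)) =
          (List.range (2 ^ m)).map (fun i => pvMask liste m i ++ [liste.getD m 0]) := by
        apply List.map_congr_left
        intro i hi
        exact pvMask_high liste m i (List.mem_range.mp hi)
      rw [hmap]
      rw [List.filter_map, List.filter_map, List.map_map]
      congr 1
      apply List.filter_congr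
      intro i _
      simp only [Function.comp, List.length_append, List.length_singleton]
      rcases Decidable.em (((pvMask liste m i).length : Int) = k - 1) with h | h <;>
        first
        | (simp [h]; omega)
        | simp [h]

theorem partiesliste_taille_spec' (taille : Int) (liste : List Int) :
    partiesliste_taille taille liste = partiesliste_taille_alt taille liste := by
  unfold partiesliste_taille partiesliste_taille_alt
  rw [PySem.List.foldl_append_ite (p := fun i => ((pvSousListe liste i).length : Int) = taille)
    (f := fun i => pvSousListe liste i)]
  rw [pvCombos_eq_filter, List.filter_map]
  simp [pvSousListe_eq_mask, Function.comp_def]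

-- ===== VERDICT (by name: the statement is the Claim_ definition above) =====
theorem partiesliste_taille_spec : Claim_equal_partiesliste_taille := by
  intro taille liste _
  exact partiesliste_taille_spec' taille liste
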